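-- pv_equiv track=rewrite | github.com/dempe/aoc | 2015/05.py | part_one
-- ===== SOURCE A (Python) =====
-- from typing import List
--
-- def part_one(lines: List[str]) -> int:
--     nice_lines = 0
--     vowels = {'a', 'e', 'i', 'o', 'u'}
--     disallowed = {'ab', 'cd', 'pq', 'xy'}
--
--     for line in lines:
--         vowel_cnt = sum(1 for c in line if c in vowels)
--         found_disallowed = any(c1 + c2 in disallowed for c1, c2 in zip(line, line[1:]))
--         found_double = any(c1 == c2 for c1, c2 in zip(line, line[1:]))
--
--         if found_double and not found_disallowed and vowel_cnt >= 3: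
--             nice_lines += 1
--     return nice_lines
-- ===== SOURCE B (Python) =====
-- from typing import List
--
--
-- def has_double(s: str) -> bool:
--     """Recursively look for two equal adjacent characters."""
--     if len(s) < 2:
--         return False
--     return s[0] == s[1] or has_double(s[1:])
--
--
-- def has_bad(s: str) -> bool:
--     """Recursively look for a disallowed two-character substring."""
--     if len(s) < 2:
--         return False
--     return s[:2] in ("ab", "cd", "pq", "xy") or has_bad(s[1:])
--
--
-- def nice(line: str) -> bool:
--     return (has_double(line)
--             and not has_bad(line)
--             and sum(line.count(v) for v in "aeiou") >= 3)
--
--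
-- def part_one(lines: List[str]) -> int:
--     return len([line for line in lines if nice(line)])
-- ===== Notes on version B (the rewrite author's own statement) =====
-- stated objective: alternative
-- what changed: A loops with an accumulator and per line runs three zip/generator comprehension scans; B is a recursive decomposition: has_double and has_bad recurse on string suffixes with pattern-style base cases, vowels are counted as the sum of five per-vowel str.count passes, and the result is the length of a filtered list.
import Mathlib
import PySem

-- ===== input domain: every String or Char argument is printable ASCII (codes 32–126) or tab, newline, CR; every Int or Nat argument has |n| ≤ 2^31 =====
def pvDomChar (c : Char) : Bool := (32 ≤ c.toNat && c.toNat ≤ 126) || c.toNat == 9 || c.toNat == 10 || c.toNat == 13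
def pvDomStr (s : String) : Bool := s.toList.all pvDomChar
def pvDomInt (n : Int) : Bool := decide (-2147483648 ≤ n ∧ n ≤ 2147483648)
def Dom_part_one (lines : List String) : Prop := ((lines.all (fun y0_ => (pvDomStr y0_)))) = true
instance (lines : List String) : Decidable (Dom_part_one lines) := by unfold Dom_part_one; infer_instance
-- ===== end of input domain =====

-- B replaces A's accumulator loop with three zip/comprehension scans per line by a recursive
-- decomposition (suffix recursion for the double/disallowed checks, per-vowel counts, filtered list).

-- ===== PORT A =====
def isVowel (c : Char) : Bool := c == 'a' || c == 'e' || c == 'i' || c == 'o' || c == 'u'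
def isBadPair (p c : Char) : Bool :=
  (p == 'a' && c == 'b') || (p == 'c' && c == 'd') || (p == 'p' && c == 'q') || (p == 'x' && c == 'y')

def part_one (lines : List String) : Int :=
  lines.foldl (fun nice_lines line =>
    let cs := line.toList
    let vowel_cnt : Nat := ((cs.filter isVowel).map (fun _ => 1)).sum
    let found_disallowed := (cs.zip cs.tail).any (fun p => isBadPair p.1 p.2)
    let found_double := (cs.zip cs.tail).any (fun p => p.1 == p.2)
    if found_double && !found_disallowed && decide (vowel_cnt ≥ 3) then nice_lines + 1 else nice_lines) 0

-- ===== PORT B =====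
-- has_double: recursion on the string's suffixes (len(s) < 2 base case)
def hasDouble : List Char → Bool
  | c1 :: c2 :: rest => c1 == c2 || hasDouble (c2 :: rest)
  | _ => false

-- has_bad: same recursion, testing the two leading characters against the four pairs
def hasBad : List Char → Bool
  | c1 :: c2 :: rest => isBadPair c1 c2 || hasBad (c2 :: rest)
  | _ => false

-- nice: sum(line.count(v) for v in "aeiou") ported via List.count per vowel
def niceB (cs : List Char) : Bool :=
  hasDouble cs && !hasBad cs &&
    decide ((("aeiou".toList).map (fun v => cs.count v)).sum ≥ 3)

def part_one_alt (lines : List String) : Int :=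
  ((lines.filter (fun line => niceB line.toList)).length : Int)

-- ===== PRECONDITION & SPEC =====
def Spec_part_one (lines : List String) (out : Int) : Prop := out = part_one_alt lines
instance (lines : List String) (out : Int) : Decidable (Spec_part_one lines out) := by unfold Spec_part_one; infer_instance

-- ===== CLAIM (what is proved, stated in full; the proofs are below) =====
def Claim_equal_part_one : Prop := ∀ (lines : List String), Dom_part_one lines → Spec_part_one lines (part_one lines)

-- ===== LEMMAS AND PROOFS =====

lemma hasDouble_eq (cs : List Char) :
    hasDouble cs = (cs.zip cs.tail).any (fun p => p.1 == p.2) := by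
  induction cs with
  | nil => simp [hasDouble]
  | cons c rest ih =>
    cases rest with
    | nil => simp [hasDouble]
    | cons d rest' => simp [hasDouble, ih]

lemma hasBad_eq (cs : List Char) :
    hasBad cs = (cs.zip cs.tail).any (fun p => isBadPair p.1 p.2) := by
  induction cs with
  | nil => simp [hasBad]
  | cons c rest ih =>
    cases rest with
    | nil => simp [hasBad]
    | cons d rest' => simp [hasBad, ih]

lemma vowel_sum_eq (cs : List Char) :
    ((("aeiou".toList).map (fun v => cs.count v)).sum) =
      ((cs.filter isVowel).map (fun _ => (1 : Nat))).sum := by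
  have hv : "aeiou".toList = ['a', 'e', 'i', 'o', 'u'] := rfl
  induction cs with
  | nil => simp
  | cons c rest ih =>
    rw [hv] at ih ⊢
    simp only [List.map_cons, List.map_nil, List.count_cons, List.sum_cons, List.sum_nil,
      List.filter_cons] at ih ⊢
    by_cases h1 : c = 'a' <;> by_cases h2 : c = 'e' <;> by_cases h3 : c = 'i' <;>
      by_cases h4 : c = 'o' <;> by_cases h5 : c = 'u' <;>
      simp_all [isVowel] <;> omega

lemma niceB_eq (cs : List Char) :
    niceB cs =
      (((cs.zip cs.tail).any (fun p => p.1 == p.2)) &&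
       !((cs.zip cs.tail).any (fun p => isBadPair p.1 p.2)) &&
       decide ((((cs.filter isVowel).map (fun _ => (1 : Nat))).sum) ≥ 3)) := by
  simp only [niceB, hasDouble_eq, hasBad_eq, vowel_sum_eq]

lemma foldl_count (p : String → Bool) (lines : List String) (n : Int) :
    lines.foldl (fun acc line => if p line then acc + 1 else acc) n =
      n + ((lines.filter p).length : Int) := by
  induction lines generalizing n with
  | nil => simp
  | cons l rest ih =>
    simp only [List.foldl_cons, List.filter_cons]
    by_cases h : p l = true <;> simp [h, ih] <;> push_cast <;> ring

-- ===== VERDICT (by name: the statement is the Claim_ definition above) =====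
theorem part_one_spec : Claim_equal_part_one := by
  intro lines _
  unfold Spec_part_one part_one part_one_alt
  have hstep : List.foldl (fun nice_lines line =>
      let cs := line.toList
      let vowel_cnt : Nat := ((cs.filter isVowel).map (fun _ => 1)).sum
      let found_disallowed := (cs.zip cs.tail).any (fun p => isBadPair p.1 p.2)
      let found_double := (cs.zip cs.tail).any (fun p => p.1 == p.2)
      if found_double && !found_disallowed && decide (vowel_cnt ≥ 3) then nice_lines + 1
      else nice_lines) (0 : Int) lines =
      List.foldl (fun acc line => if niceB line.toList then acc + 1 else acc) (0 : Int) lines := by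
    congr 1
    funext acc line
    simp only [niceB_eq]
  rw [hstep, foldl_count (fun line => niceB line.toList) lines 0, zero_add]
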